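-- pv_equiv track=rewrite | github.com/Laelaps9/ap-labs | challenges/chal1/chal1.py | count
-- ===== SOURCE A (Python) =====
-- def count(string, arr, length):
--     longest = 0
--     if len(string) == 0:
--         return length
--     else:
--         if string[0] not in arr:
--             length += 1
--             arr.append(string[0])
--         else:
--             return length
--         return count(string[1:], arr, length)
-- ===== SOURCE B (Python) =====
-- def count(string, arr, length):
--     for ch in string:
--         if ch not in arr:
--             length += 1
--             arr.append(ch)
--         else:
--             return length
--     return length
-- ===== Notes on version B (the rewrite author's own statement) =====
-- stated objective: simpler
-- what changed: Replaced A's tail recursion (which slices string[1:] on every call) by a single explicit for-loop over the characters with length accumulated in place; membership test and arr.append are unchanged.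
import Mathlib
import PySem

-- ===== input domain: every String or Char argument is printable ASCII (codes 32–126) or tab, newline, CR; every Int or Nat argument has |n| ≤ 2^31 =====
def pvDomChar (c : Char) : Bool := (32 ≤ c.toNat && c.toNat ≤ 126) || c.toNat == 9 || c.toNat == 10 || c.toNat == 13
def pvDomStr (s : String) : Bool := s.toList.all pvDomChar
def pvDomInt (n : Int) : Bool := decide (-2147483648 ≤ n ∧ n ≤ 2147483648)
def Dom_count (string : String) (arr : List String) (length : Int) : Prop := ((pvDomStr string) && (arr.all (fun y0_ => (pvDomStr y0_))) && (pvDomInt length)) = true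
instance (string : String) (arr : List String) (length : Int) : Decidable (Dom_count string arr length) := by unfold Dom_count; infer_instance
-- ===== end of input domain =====

-- B replaces A's tail recursion (with its per-call string slicing) by a single iterative pass
-- over the characters with an accumulator; same return value and the same appends to arr.

-- ===== PORT A =====
-- A recurses: empty → length; head not in arr → recurse on string[1:] with arr+[head], length+1; else → length.
def countRecA : List Char → List String → Int → Int
  | [], _, length => length
  | c :: rest, arr, length =>
    if ¬ (String.ofList [c] ∈ arr) then
      countRecA rest (arr ++ [String.ofList [c]]) (length + 1)
    else
      length

def count (string : String) (arr : List String) (length : Int) : Int :=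
  countRecA string.toList arr length

-- ===== PORT B =====
-- B's loop: fold over the characters carrying a "returned" flag plus the mutable (arr, length).
def count_alt (string : String) (arr : List String) (length : Int) : Int :=
  (string.toList.foldl
    (fun (st : Bool × List String × Int) c =>
      match st with
      | (true, a, l) => (true, a, l)
      | (false, a, l) =>
        if ¬ (String.ofList [c] ∈ a) then (false, a ++ [String.ofList [c]], l + 1)
        else (true, a, l))
    (false, arr, length)).2.2

-- ===== PRECONDITION & SPEC =====
def Spec_count (string : String) (arr : List String) (length : Int) (out : Int) : Prop := out = count_alt string arr length
instance (string : String) (arr : List String) (length : Int) (out : Int) : Decidable (Spec_count string arr length out) := by unfold Spec_count; infer_instance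

-- ===== CLAIM (what is proved, stated in full; the proofs are below) =====
def Claim_equal_count : Prop := ∀ (string : String) (arr : List String) (length : Int), Dom_count string arr length → Spec_count string arr length (count string arr length)

-- ===== LEMMAS AND PROOFS =====
-- abbreviation for B's loop step
def stepB (st : Bool × List String × Int) (c : Char) : Bool × List String × Int :=
  match st with
  | (true, a, l) => (true, a, l)
  | (false, a, l) =>
    if ¬ (String.ofList [c] ∈ a) then (false, a ++ [String.ofList [c]], l + 1)
    else (true, a, l)

-- once the flag is set, the fold keeps the state unchanged
theorem foldl_stepB_done (cs : List Char) (a : List String) (l : Int) :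
    cs.foldl stepB (true, a, l) = (true, a, l) := by
  induction cs with
  | nil => rfl
  | cons c cs ih => simpa [stepB] using ih

theorem countRecA_eq_foldl (cs : List Char) (a : List String) (l : Int) :
    countRecA cs a l = (cs.foldl stepB (false, a, l)).2.2 := by
  induction cs generalizing a l with
  | nil => rfl
  | cons c cs ih =>
    by_cases h : String.ofList [c] ∈ a
    · simp [countRecA, stepB, h, foldl_stepB_done]
    · simp [countRecA, stepB, h, ih]

-- ===== VERDICT (by name: the statement is the Claim_ definition above) =====
theorem count_spec : Claim_equal_count := by
  intro string arr length _
  exact countRecA_eq_foldl string.toList arr length
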